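-- pv_equiv track=rewrite | github.com/AMSC22/WiFi | WiFi2.py | Ecriture
-- ===== SOURCE A (Python) =====
-- def Ecriture(a):
--     b, count = '', 0
--     for i in a:
--         for j in hex(ord(i))[2:]:
--             c, k0, k1, k = bin(ord(j))[1:], 0, 0, 0
--             c += str(abs(int(c[-1])-1))
--             while(k == 0):
--                 if(c[k0] == c[k1]):
--                     count += 1
--                     k1 += 1
--                 else:
--                     if(count == 1): b += c[k0]
--                     else: b += str(count) + c[k0]
--                     k0, count = k1, 0
--                 if(k1 == len(c)): k, count = 1, 0
--     return b.replace('b', '0x')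
-- ===== SOURCE B (Python) =====
-- # The transform only ever encodes one of the 16 hex digit characters: the run-length
-- # encoding of 'b' + bin(ord(digit))[2:] is a fixed string per digit, with the leading
-- # 'b' already rewritten to '0x'.  So the whole function is a table lookup per hex digit.
-- _ENC = {'0': '0x2140', '1': '0x21301', '2': '0x212010', '3': '0x212021',
--         '4': '0x210120', '5': '0x210101', '6': '0x210210', '7': '0x21031',
--         '8': '0x3130', '9': '0x31201', 'a': '0x21401', 'b': '0x213010',
--         'c': '0x213021', 'd': '0x2120120', 'e': '0x2120101', 'f': '0x2120210'}
--
-- def Ecriture(a):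
--     return ''.join(_ENC[j] for i in a for j in format(ord(i), 'x'))
-- ===== Notes on version B (the rewrite author's own statement) =====
-- stated objective: faster
-- what changed: Replaces A's per-character run-length state machine (k0/k1/count pointers, appended sentinel bit, final string replace) by a precomputed 16-entry table mapping each hex digit directly to its fixed encoded chunk with the prefix rewrite already folded in, so B does one dict lookup per hex digit and no scanning or replacing at runtime.
import Mathlib
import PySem

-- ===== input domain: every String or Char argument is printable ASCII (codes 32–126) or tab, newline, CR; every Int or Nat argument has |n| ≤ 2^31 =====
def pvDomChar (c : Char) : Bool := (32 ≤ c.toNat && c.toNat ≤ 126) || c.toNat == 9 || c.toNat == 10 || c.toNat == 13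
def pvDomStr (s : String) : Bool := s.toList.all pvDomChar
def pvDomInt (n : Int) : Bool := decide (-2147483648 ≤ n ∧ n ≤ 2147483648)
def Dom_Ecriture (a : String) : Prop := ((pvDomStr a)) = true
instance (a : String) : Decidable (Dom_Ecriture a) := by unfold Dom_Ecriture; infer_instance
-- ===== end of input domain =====

-- B replaces A's run-length state machine and final prefix replacement by a precomputed
-- 16-entry lookup table (one fixed chunk per hex digit); objective: faster (measured).

-- ===== PORT A =====
-- hex(n)[2:] for n ≥ 0, as a list of chars (fuel-structural; fuel n+1 always suffices)
def pvHexDigit (n : Nat) : Char :=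
  if n < 10 then Char.ofNat (48 + n) else Char.ofNat (87 + n)

def pvHexAux : Nat → Nat → List Char
  | 0, _ => []
  | fuel + 1, n =>
    if n < 16 then [pvHexDigit n] else pvHexAux fuel (n / 16) ++ [pvHexDigit (n % 16)]

def pvHexDigits (n : Nat) : List Char := pvHexAux (n + 1) n

-- bin(n)[2:] for n ≥ 0, as a list of chars
def pvBinAux : Nat → Nat → List Char
  | 0, _ => []
  | fuel + 1, n =>
    if n < 2 then [Char.ofNat (48 + n)]
    else pvBinAux fuel (n / 2) ++ [Char.ofNat (48 + n % 2)]

def pvBinDigits (n : Nat) : List Char := pvBinAux (n + 1) n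

-- A's while loop, step for step; fuel bounds the iteration count (2*len c + 2 is always
-- enough: every step either advances k1 or is followed by a k1-advancing step)
def pvLoopA (c : List Char) : Nat → List Char → Nat → Nat → Nat → List Char × Nat
  | 0, b, count, _, _ => (b, count)
  | fuel+1, b, count, k0, k1 =>
    if c.getD k0 ' ' == c.getD k1 ' ' then
      -- count += 1; k1 += 1
      if k1 + 1 == c.length then (b, 0)
      else pvLoopA c fuel b (count + 1) k0 (k1 + 1)
    else
      let b := if count == 1 then b ++ [c.getD k0 ' ']
               else b ++ (toString count).toList ++ [c.getD k0 ' ']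
      if k1 == c.length then (b, 0)
      else pvLoopA c fuel b 0 k1 k1

-- the body of A's inner `for j` loop acting on the state (b, count)
def pvDigitA (j : Char) (st : List Char × Nat) : List Char × Nat :=
  let c0 := 'b' :: pvBinDigits j.toNat
  let c := c0 ++ [if c0.getLastD ' ' == '0' then '1' else '0']  -- c += str(abs(int(c[-1])-1))
  pvLoopA c (2 * c.length + 2) st.1 st.2 0 0

def Ecriture (a : String) : String :=
  let st := a.toList.foldl
    (fun st i => (pvHexDigits i.toNat).foldl (fun st j => pvDigitA j st) st) ([], 0)
  PySem.Str.replace (String.ofList st.1) "b" "0x"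

-- ===== PORT B =====
-- the precomputed table _ENC of Source B: hex digit ↦ its fixed encoded chunk
def pvEnc (j : Char) : List Char :=
  if j == '0' then ['0','x','2','1','4','0']
  else if j == '1' then ['0','x','2','1','3','0','1']
  else if j == '2' then ['0','x','2','1','2','0','1','0']
  else if j == '3' then ['0','x','2','1','2','0','2','1']
  else if j == '4' then ['0','x','2','1','0','1','2','0']
  else if j == '5' then ['0','x','2','1','0','1','0','1']
  else if j == '6' then ['0','x','2','1','0','2','1','0']
  else if j == '7' then ['0','x','2','1','0','3','1']
  else if j == '8' then ['0','x','3','1','3','0']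
  else if j == '9' then ['0','x','3','1','2','0','1']
  else if j == 'a' then ['0','x','2','1','4','0','1']
  else if j == 'b' then ['0','x','2','1','3','0','1','0']
  else if j == 'c' then ['0','x','2','1','3','0','2','1']
  else if j == 'd' then ['0','x','2','1','2','0','1','2','0']
  else if j == 'e' then ['0','x','2','1','2','0','1','0','1']
  else ['0','x','2','1','2','0','2','1','0']  -- 'f'

def Ecriture_alt (a : String) : String :=
  String.ofList (a.toList.flatMap fun i => (pvHexDigits i.toNat).flatMap pvEnc)

-- ===== PRECONDITION & SPEC =====
def Spec_Ecriture (a : String) (out : String) : Prop := out = Ecriture_alt a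
instance (a : String) (out : String) : Decidable (Spec_Ecriture a out) := by unfold Spec_Ecriture; infer_instance

-- ===== CLAIM (what is proved, stated in full; the proofs are below) =====
def Claim_equal_Ecriture : Prop := ∀ (a : String), Dom_Ecriture a → Spec_Ecriture a (Ecriture a)

-- ===== LEMMAS AND PROOFS =====
-- A's per-hex-digit raw chunk (still 'b'-headed, before the final replace)
def pvPartA (j : Char) : List Char := (pvDigitA j ([], 0)).1

-- pointwise effect of replace('b','0x') on chars
def pvRepl (l : List Char) : List Char :=
  l.flatMap fun c => if c == 'b' then ['0','x'] else [c]

def pvHexChars : List Char :=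
  ['0','1','2','3','4','5','6','7','8','9','a','b','c','d','e','f']

theorem pvHexDigit_mem (n : Nat) (h : n < 16) : pvHexDigit n ∈ pvHexChars := by
  interval_cases n <;> decide

theorem pvHexAux_mem : ∀ fuel n, ∀ d ∈ pvHexAux fuel n, d ∈ pvHexChars := by
  intro fuel
  induction fuel with
  | zero => intro n d hd; simp [pvHexAux] at hd
  | succ fuel ih =>
    intro n d hd
    rw [pvHexAux] at hd
    split at hd
    · simp at hd; subst hd; exact pvHexDigit_mem n (by assumption)
    · rcases List.mem_append.mp hd with h1 | h2
      · exact ih _ d h1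
      · simp at h2; subst h2; exact pvHexDigit_mem _ (Nat.mod_lt _ (by omega))

theorem pvHexDigits_mem (n : Nat) : ∀ d ∈ pvHexDigits n, d ∈ pvHexChars :=
  pvHexAux_mem (n + 1) n

theorem pvLoopA_append (c : List Char) (fuel : Nat) :
    ∀ count k0 k1 b, pvLoopA c fuel b count k0 k1 =
      (b ++ (pvLoopA c fuel [] count k0 k1).1, (pvLoopA c fuel [] count k0 k1).2) := by
  induction fuel with
  | zero => intro count k0 k1 b; simp [pvLoopA]
  | succ fuel ih =>
    intro count k0 k1 b
    simp only [pvLoopA]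
    by_cases h1 : (c.getD k0 ' ' == c.getD k1 ' ') = true
    · rw [if_pos h1, if_pos h1]
      by_cases h2 : (k1 + 1 == c.length) = true
      · rw [if_pos h2, if_pos h2]; simp
      · rw [if_neg h2, if_neg h2]
        conv_lhs => rw [ih]
    · rw [if_neg h1, if_neg h1]
      by_cases h2 : (k1 == c.length) = true
      · rw [if_pos h2, if_pos h2]
        by_cases h3 : (count == 1) = true <;> simp [h3]
      · rw [if_neg h2, if_neg h2]
        conv_rhs => rw [ih]
        rw [ih]
        by_cases h3 : (count == 1) = true <;> simp [h3]

-- per hex digit, A's state machine from count = 0 leaves count = 0, and replacing 'b' by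
-- "0x" in its chunk gives exactly B's table entry (finite check over the 16 hex chars)
set_option maxRecDepth 40000 in
theorem pvDigitA_eq : ∀ j ∈ pvHexChars,
    pvDigitA j ([], 0) = (pvPartA j, 0) ∧ pvRepl (pvPartA j) = pvEnc j := by
  intro j hj
  simp only [pvHexChars, List.mem_cons, List.not_mem_nil, or_false] at hj
  rcases hj with h|h|h|h|h|h|h|h|h|h|h|h|h|h|h|h <;> subst h <;> exact ⟨by decide, by decide⟩

theorem pvDigitA_state (j : Char) (hj : j ∈ pvHexChars) (b : List Char) :
    pvDigitA j (b, 0) = (b ++ pvPartA j, 0) := by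
  have h := (pvDigitA_eq j hj).1
  simp only [pvDigitA] at h ⊢
  rw [pvLoopA_append]
  rw [show (pvLoopA ((('b' :: pvBinDigits j.toNat) ++ [if ('b' :: pvBinDigits j.toNat).getLastD ' ' == '0' then '1' else '0'])) (2 * (('b' :: pvBinDigits j.toNat) ++ [if ('b' :: pvBinDigits j.toNat).getLastD ' ' == '0' then '1' else '0']).length + 2) [] 0 0 0) = (pvPartA j, 0) from h]

theorem pvFoldDigits (ds : List Char) (hds : ∀ d ∈ ds, d ∈ pvHexChars) (b : List Char) :
    ds.foldl (fun st j => pvDigitA j st) (b, 0) = (b ++ ds.flatMap pvPartA, 0) := by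
  induction ds generalizing b with
  | nil => simp
  | cons d ds ih =>
    simp only [List.foldl_cons, List.flatMap_cons]
    rw [pvDigitA_state d (hds d (by simp)) b, ih (fun x hx => hds x (by simp [hx]))]
    simp

theorem pvFoldChars (l : List Char) (b : List Char) :
    l.foldl (fun st i => (pvHexDigits i.toNat).foldl (fun st j => pvDigitA j st) st) (b, 0) =
      (b ++ l.flatMap (fun i => (pvHexDigits i.toNat).flatMap pvPartA), 0) := by
  induction l generalizing b with
  | nil => simp
  | cons x l ih =>
    simp only [List.foldl_cons, List.flatMap_cons]
    rw [pvFoldDigits _ (pvHexDigits_mem x.toNat) b, ih]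
    simp

-- replace with the one-char needle "b" is the pointwise map pvRepl
theorem pvReplaceGo (l : List Char) : ∀ fuel acc, l.length ≤ fuel →
    PySem.Chars.replace.go ['b'] ['0','x'] fuel l acc = acc.reverse ++ pvRepl l := by
  induction l with
  | nil =>
    intro fuel acc _
    cases fuel <;> simp [PySem.Chars.replace.go, pvRepl]
  | cons c t ih =>
    intro fuel acc hle
    cases fuel with
    | zero => simp at hle
    | succ fuel =>
      rw [PySem.Chars.replace.go]
      by_cases hc : (c == 'b') = true
      · have hb : c = 'b' := by simpa using hc
        subst hb
        rw [if_pos (by simp [List.isPrefixOf])]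
        simp only [List.length_cons, List.drop_succ_cons, List.length_nil, List.drop_zero]
        rw [ih fuel _ (by simpa using hle)]
        simp [pvRepl]
      · have hc' : ¬ ('b' = c) := fun h => hc (by simp [h.symm])
        rw [if_neg (by simp [List.isPrefixOf]; exact hc')]
        rw [ih fuel _ (by simpa using hle)]
        simp only [pvRepl, List.flatMap_cons, List.reverse_cons, List.append_assoc]
        rw [if_neg hc]

theorem pvReplace_eq (l : List Char) :
    PySem.Chars.replace l ['b'] ['0','x'] = pvRepl l := by
  rw [PySem.Chars.replace]
  rw [if_neg (by simp)]
  simpa using pvReplaceGo l l.length [] le_rfl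

-- ===== VERDICT (by name: the statement is the Claim_ definition above) =====
theorem Ecriture_spec : Claim_equal_Ecriture := by
  intro a _
  unfold Spec_Ecriture Ecriture Ecriture_alt
  rw [pvFoldChars a.toList []]
  show PySem.Str.replace (String.ofList (a.toList.flatMap fun i => (pvHexDigits i.toNat).flatMap pvPartA)) "b" "0x" = _
  rw [PySem.Str.replace]
  simp only [String.toList_ofList]
  rw [show ("b" : String).toList = ['b'] from rfl, show ("0x" : String).toList = ['0','x'] from rfl]
  rw [pvReplace_eq]
  have : pvRepl (a.toList.flatMap fun i => (pvHexDigits i.toNat).flatMap pvPartA)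
      = a.toList.flatMap fun i => (pvHexDigits i.toNat).flatMap pvEnc := by
    unfold pvRepl
    rw [List.flatMap_assoc]
    refine List.flatMap_congr (fun i _ => ?_)
    rw [List.flatMap_assoc]
    exact List.flatMap_congr (fun j hj => (pvDigitA_eq j (pvHexDigits_mem i.toNat j hj)).2)
  rw [this]
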